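-- pv_equiv track=rewrite | github.com/SonGotSamples/Sample-Split-2026 | yt_video_multi.py | _trim_tags_to_limit
-- ===== SOURCE A (Python) =====
-- from typing import Dict, Iterable, List, Optional, Tuple, Any
--
-- MAX_TAGS_TOTAL_LENGTH = 500
--
-- def _trim_tags_to_limit(values: Iterable[str], limit: int = MAX_TAGS_TOTAL_LENGTH) -> List[str]:
--     total = 0
--     trimmed: List[str] = []
--     for tag in values:
--         if not tag:
--             continue
--         prospective = total + (1 if trimmed else 0) + len(tag)
--         if prospective > limit:
--             break
--         trimmed.append(tag)
--         total = prospective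
--     return trimmed
-- ===== SOURCE B (Python) =====
-- MAX_TAGS_TOTAL_LENGTH = 500
--
-- def _trim_tags_to_limit(values, limit=MAX_TAGS_TOTAL_LENGTH):
--     tags = [t for t in values if t]
--     prefix = [0]
--     for t in tags:
--         prefix.append(prefix[-1] + len(t))
--     # Cost of keeping the first k tags is prefix[k] + (k - 1) separators.
--     # Each kept tag is non-empty, so the cost is strictly increasing in k:
--     # binary-search the largest feasible k and return that prefix of tags.
--     lo, hi = 0, len(tags)
--     while lo < hi:
--         mid = (lo + hi + 1) // 2
--         if prefix[mid] + mid - 1 <= limit: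
--             lo = mid
--         else:
--             hi = mid - 1
--     return tags[:lo]
-- ===== Notes on version B (the rewrite author's own statement) =====
-- stated objective: alternative
-- what changed: B filters the non-empty tags, builds a prefix-sum array of their lengths, and binary-searches the largest k with prefix[k]+k-1 <= limit (valid because the cost is strictly increasing over non-empty tags), returning tags[:k], instead of A's single running-total loop with an early break.
import Mathlib
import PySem

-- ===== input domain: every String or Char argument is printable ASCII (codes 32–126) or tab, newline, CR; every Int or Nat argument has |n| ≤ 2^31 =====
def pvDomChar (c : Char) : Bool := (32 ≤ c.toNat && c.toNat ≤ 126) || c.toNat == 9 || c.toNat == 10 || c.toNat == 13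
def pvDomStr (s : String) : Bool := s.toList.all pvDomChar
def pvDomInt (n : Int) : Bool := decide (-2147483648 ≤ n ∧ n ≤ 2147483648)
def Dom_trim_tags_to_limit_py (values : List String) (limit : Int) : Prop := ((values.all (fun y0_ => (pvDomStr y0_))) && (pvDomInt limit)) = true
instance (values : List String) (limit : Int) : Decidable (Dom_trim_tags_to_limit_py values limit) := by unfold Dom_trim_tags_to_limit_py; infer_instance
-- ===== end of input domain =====

-- B replaces A's running-total loop with prefix sums + binary search for the largest feasible prefix; objective: alternative algorithm, same result.

-- ===== PORT A =====
-- A's for-loop over `values` with state (total, trimmed); `break` = return trimmed.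
def pvALoop (limit : Int) : List String → Int → List String → List String
  | [], _, trimmed => trimmed
  | tag :: rest, total, trimmed =>
    if tag = "" then pvALoop limit rest total trimmed
    else
      let prospective := total + (if trimmed = [] then 0 else 1) + PySem.Str.len tag
      if prospective > limit then trimmed
      else pvALoop limit rest prospective (trimmed ++ [tag])

def trim_tags_to_limit_py (values : List String) (limit : Int) : List String :=
  pvALoop limit values 0 []

-- ===== PORT B =====
-- Source B's prefix-building loop: `for t in tags: prefix.append(prefix[-1] + len(t))`.
-- `prefix[-1]` ported as getLastD 0: exact, since prefix starts as [0] and is never empty.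
def pvPrefixLoop : List String → List Int → List Int
  | [], pre => pre
  | t :: rest, pre => pvPrefixLoop rest (pre ++ [pre.getLastD 0 + PySem.Str.len t])

-- Source B's `while lo < hi` binary search; lo, hi are non-negative throughout in Python, so Nat is exact;
-- `prefix[mid]` via pyGet? (in range: 1 ≤ mid ≤ len(tags) < len(prefix)); `(lo+hi+1)//2` on Nats = Python's floor division.
-- The loop is transcribed with a fuel counter (hi - lo shrinks each iteration, so fuel ≥ hi - lo suffices; a pure totality guard).
def pvBSearch (pre : List Int) (limit : Int) : Nat → Nat → Nat → Nat
  | 0, lo, _hi => lo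
  | fuel + 1, lo, hi =>
    if lo < hi then
      let mid := (lo + hi + 1) / 2
      if ((PySem.List.pyGet? pre (mid : Int)).getD 0) + (mid : Int) - 1 ≤ limit then
        pvBSearch pre limit fuel mid hi
      else
        pvBSearch pre limit fuel lo (mid - 1)
    else lo

def trim_tags_to_limit_py_alt (values : List String) (limit : Int) : List String :=
  let tags := values.filter (fun t => ¬ (t = ""))
  let pre := pvPrefixLoop tags [0]
  let lo := pvBSearch pre limit tags.length 0 tags.length
  tags.take lo   -- tags[:lo], exact since 0 ≤ lo

-- ===== PRECONDITION & SPEC =====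
def Spec_trim_tags_to_limit_py (values : List String) (limit : Int) (out : List String) : Prop := out = trim_tags_to_limit_py_alt values limit
instance (values : List String) (limit : Int) (out : List String) : Decidable (Spec_trim_tags_to_limit_py values limit out) := by unfold Spec_trim_tags_to_limit_py; infer_instance

-- ===== CLAIM =====
def Claim_equal_trim_tags_to_limit_py : Prop := ∀ (values : List String) (limit : Int), Dom_trim_tags_to_limit_py values limit → Spec_trim_tags_to_limit_py values limit (trim_tags_to_limit_py values limit)

-- ===== LEMMAS AND PROOFS =====

-- Greedy recursion equivalent to A's loop on the filtered tags (acc = lengths kept + separators).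
def pvGC (limit : Int) : List String → Int → Nat
  | [], _ => 0
  | t :: r, acc => if acc + PySem.Str.len t ≤ limit then pvGC limit r (acc + PySem.Str.len t + 1) + 1 else 0

-- Sum of the lengths of the first k tags.
def pvS : List String → Nat → Int
  | _, 0 => 0
  | [], _ + 1 => 0
  | t :: r, k + 1 => PySem.Str.len t + pvS r k

-- The cumulative sums the B port's prefix loop produces.
def pvSums : List String → Int → List Int
  | [], _ => []
  | t :: r, s => (s + PySem.Str.len t) :: pvSums r (s + PySem.Str.len t)

lemma pvA_eq_gc (limit : Int) :
    ∀ (vs : List String) (total : Int) (trimmed : List String),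
      pvALoop limit vs total trimmed
        = trimmed ++ (vs.filter (fun t => ¬ (t = ""))).take
            (pvGC limit (vs.filter (fun t => ¬ (t = ""))) (total + (if trimmed = [] then 0 else 1))) := by
  intro vs
  induction vs with
  | nil => intro total trimmed; simp [pvALoop, pvGC]
  | cons tag rest ih =>
    intro total trimmed
    by_cases he : tag = ""
    · have hfe : (tag :: rest).filter (fun t => ¬ (t = "")) = rest.filter (fun t => ¬ (t = "")) := by
        simp [he]
      simp only [pvALoop, if_pos he, hfe]
      exact ih total trimmed
    · have hfc : (tag :: rest).filter (fun t => ¬ (t = ""))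
          = tag :: rest.filter (fun t => ¬ (t = "")) := by simp [he]
      rw [hfc]
      simp only [pvALoop, if_neg he]
      set sep : Int := (if trimmed = [] then 0 else 1) with hsep
      by_cases hp : total + sep + PySem.Str.len tag > limit
      · rw [if_pos hp]
        have hno : ¬ (total + sep + PySem.Str.len tag ≤ limit) := by omega
        simp only [pvGC, if_neg hno, List.take_zero, List.append_nil]
      · rw [if_neg hp]
        rw [ih (total + sep + PySem.Str.len tag) (trimmed ++ [tag])]
        have hne : ¬ (trimmed ++ [tag] = []) := by simp
        rw [if_neg hne]
        have hyes : total + sep + PySem.Str.len tag ≤ limit := by omega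
        simp only [pvGC, if_pos hyes]
        rw [show total + sep + PySem.Str.len tag + 1
              = total + sep + (PySem.Str.len tag + 1) by omega]
        simp [List.take_succ_cons]

lemma pvLen_pos (t : String) (h : t ≠ "") : 1 ≤ (t.length : Int) := by
  have : t.length ≠ 0 := by simpa [String.length_eq_zero_iff] using h
  omega

lemma pvS_mono : ∀ (tags : List String), (∀ t ∈ tags, t ≠ "") →
    ∀ k j : Nat, k ≤ j → j ≤ tags.length → pvS tags k + (j : Int) - (k : Int) ≤ pvS tags j := by
  intro tags
  induction tags with
  | nil => intro _ k j hkj hj; simp at hj; subst hj; simp at hkj; subst hkj; simp [pvS]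
  | cons t r ih =>
    intro h k j hkj hj
    have ht : t ≠ "" := h t (by simp)
    have hr : ∀ x ∈ r, x ≠ "" := fun x hx => h x (by simp [hx])
    have hlt := pvLen_pos t ht
    cases j with
    | zero => interval_cases k; simp [pvS]
    | succ j' =>
      cases k with
      | zero =>
        have := ih hr 0 j' (Nat.zero_le _) (by simpa using hj)
        simp only [pvS, PySem.Str.len_eq, String.length_toList] at *
        push_cast at *
        omega
      | succ k' =>
        have := ih hr k' j' (by omega) (by simpa using hj)
        simp only [pvS]
        push_cast at *
        omega

-- Feasibility is downward closed (over non-empty tags).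
lemma pvP_down (tags : List String) (limit : Int) (h : ∀ t ∈ tags, t ≠ "") :
    ∀ k j : Nat, k ≤ j → j ≤ tags.length →
      pvS tags j + (j : Int) - 1 ≤ limit → pvS tags k + (k : Int) - 1 ≤ limit := by
  intro k j hkj hj hP
  have := pvS_mono tags h k j hkj hj
  omega

lemma pvGC_le (limit : Int) : ∀ (tags : List String) (acc : Int), pvGC limit tags acc ≤ tags.length := by
  intro tags
  induction tags with
  | nil => intro acc; simp [pvGC]
  | cons t r ih =>
    intro acc
    simp only [pvGC, List.length_cons]
    split
    · have := ih (acc + PySem.Str.len t + 1); omega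
    · omega

lemma pvGC_spec (limit : Int) : ∀ (tags : List String), (∀ t ∈ tags, t ≠ "") → ∀ (acc : Int),
    (∀ k : Nat, 1 ≤ k → k ≤ pvGC limit tags acc → acc + pvS tags k + (k : Int) - 1 ≤ limit) ∧
    (∀ k : Nat, pvGC limit tags acc < k → k ≤ tags.length → ¬ (acc + pvS tags k + (k : Int) - 1 ≤ limit)) := by
  intro tags
  induction tags with
  | nil =>
    intro _ acc
    constructor
    · intro k h1 h2; simp [pvGC] at h2; omega
    · intro k _ h2; simp at h2; omega
  | cons t r ih =>
    intro h acc
    have ht : t ≠ "" := h t (by simp)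
    have hr : ∀ x ∈ r, x ≠ "" := fun x hx => h x (by simp [hx])
    have hlt := pvLen_pos t ht
    by_cases hc : acc + PySem.Str.len t ≤ limit
    · have hgc : pvGC limit (t :: r) acc = pvGC limit r (acc + PySem.Str.len t + 1) + 1 := by
        simp only [pvGC, if_pos hc]
      obtain ⟨ih1, ih2⟩ := ih hr (acc + PySem.Str.len t + 1)
      constructor
      · intro k h1 h2
        cases k with
        | zero => omega
        | succ k' =>
          cases k' with
          | zero =>
            simp only [pvS, PySem.Str.len_eq, String.length_toList] at *
            omega
          | succ k'' =>
            have := ih1 (k'' + 1) (by omega) (by omega)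
            simp only [pvS, PySem.Str.len_eq, String.length_toList] at *
            push_cast at *
            omega
      · intro k hk1 hk2
        cases k with
        | zero => omega
        | succ k' =>
          have := ih2 k' (by omega) (by simpa using hk2)
          simp only [pvS, PySem.Str.len_eq, String.length_toList] at *
          push_cast at *
          omega
    · have hgc : pvGC limit (t :: r) acc = 0 := by simp only [pvGC, if_neg hc]
      constructor
      · intro k h1 h2; omega
      · intro k hk1 hk2
        cases k with
        | zero => omega
        | succ k' =>
          have hS := pvS_mono r hr 0 k' (Nat.zero_le _) (by simpa using hk2)
          simp only [pvS, PySem.Str.len_eq, String.length_toList] at *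
          push_cast at *
          omega

lemma pvSums_length : ∀ (ts : List String) (s : Int), (pvSums ts s).length = ts.length := by
  intro ts
  induction ts with
  | nil => intro s; simp [pvSums]
  | cons t r ih => intro s; simp [pvSums, ih]

lemma pvPrefixLoop_eq : ∀ (ts : List String) (acc : List Int), acc ≠ [] →
    pvPrefixLoop ts acc = acc ++ pvSums ts (acc.getLastD 0) := by
  intro ts
  induction ts with
  | nil => intro acc _; simp [pvPrefixLoop, pvSums]
  | cons t r ih =>
    intro acc hne
    simp only [pvPrefixLoop, pvSums]
    rw [ih (acc ++ [acc.getLastD 0 + PySem.Str.len t]) (by simp)]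
    simp

lemma pvSums_getD : ∀ (ts : List String) (s : Int) (k : Nat), k ≤ ts.length →
    ((s :: pvSums ts s).getD k 0) = s + pvS ts k := by
  intro ts
  induction ts with
  | nil =>
    intro s k hk
    have hk0 : k = 0 := by simpa using hk
    subst hk0; simp [pvSums, pvS]
  | cons t r ih =>
    intro s k hk
    cases k with
    | zero => simp [pvS]
    | succ k' =>
      simp only [pvSums, List.getD_cons_succ]
      have := ih (s + PySem.Str.len t) k' (by simpa using hk)
      simp only [pvS]
      omega

-- pyGet? at an in-range non-negative index, as getD.
lemma pv_pyGet_getD (xs : List Int) (k : Nat) (hk : k < xs.length) :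
    ((PySem.List.pyGet? xs (k : Int)).getD 0) = xs.getD k 0 := by
  simp [PySem.List.pyGet?_natCast, List.getD, List.getElem?_eq_getElem hk]

lemma pvBS_spec (tags : List String) (limit : Int) (h : ∀ t ∈ tags, t ≠ "") :
    ∀ (fuel lo hi : Nat), hi - lo ≤ fuel → lo ≤ hi → hi ≤ tags.length →
      (∀ k : Nat, 1 ≤ k → k ≤ lo → pvS tags k + (k : Int) - 1 ≤ limit) →
      (∀ k : Nat, hi < k → k ≤ tags.length → ¬ (pvS tags k + (k : Int) - 1 ≤ limit)) →
      (pvBSearch (pvPrefixLoop tags [0]) limit fuel lo hi ≤ tags.length) ∧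
      (∀ k : Nat, 1 ≤ k → k ≤ pvBSearch (pvPrefixLoop tags [0]) limit fuel lo hi →
        pvS tags k + (k : Int) - 1 ≤ limit) ∧
      (∀ k : Nat, pvBSearch (pvPrefixLoop tags [0]) limit fuel lo hi < k → k ≤ tags.length →
        ¬ (pvS tags k + (k : Int) - 1 ≤ limit)) := by
  have hpre : pvPrefixLoop tags [0] = 0 :: pvSums tags 0 := by
    rw [pvPrefixLoop_eq tags [0] (by simp)]; simp
  have hlen : (pvPrefixLoop tags [0]).length = tags.length + 1 := by
    rw [hpre]; simp [pvSums_length]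
  intro fuel
  induction fuel with
  | zero =>
    intro lo hi hf hle hhi h1 h2
    have hlh : lo = hi := by omega
    subst hlh
    have h0 : pvBSearch (pvPrefixLoop tags [0]) limit 0 lo lo = lo := rfl
    rw [h0]
    exact ⟨by omega, h1, h2⟩
  | succ fuel ih =>
    intro lo hi hf hle hhi h1 h2
    by_cases hlh : lo < hi
    · have hmid1 : lo < (lo + hi + 1) / 2 := by omega
      have hmid2 : (lo + hi + 1) / 2 ≤ hi := by omega
      have hval : ((PySem.List.pyGet? (pvPrefixLoop tags [0]) (((lo + hi + 1) / 2 : Nat) : Int)).getD 0)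
          = pvS tags ((lo + hi + 1) / 2) := by
        rw [pv_pyGet_getD _ _ (by omega), hpre, pvSums_getD tags 0 _ (by omega)]
        omega
      by_cases hP : pvS tags ((lo + hi + 1) / 2) + (((lo + hi + 1) / 2 : Nat) : Int) - 1 ≤ limit
      · have hstep : pvBSearch (pvPrefixLoop tags [0]) limit (fuel + 1) lo hi
            = pvBSearch (pvPrefixLoop tags [0]) limit fuel ((lo + hi + 1) / 2) hi := by
          simp only [pvBSearch, if_pos hlh, hval, if_pos hP]
        rw [hstep]
        exact ih _ _ (by omega) (by omega) hhi
          (fun k hk1 hk2 => pvP_down tags limit h k ((lo + hi + 1) / 2) hk2 (by omega) hP) h2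
      · have hstep : pvBSearch (pvPrefixLoop tags [0]) limit (fuel + 1) lo hi
            = pvBSearch (pvPrefixLoop tags [0]) limit fuel lo ((lo + hi + 1) / 2 - 1) := by
          simp only [pvBSearch, if_pos hlh, hval, if_neg hP]
        rw [hstep]
        refine ih _ _ (by omega) (by omega) (by omega) h1 ?_
        intro k hk1 hk2 hPk
        exact hP (pvP_down tags limit h ((lo + hi + 1) / 2) k (by omega) hk2 hPk)
    · have : pvBSearch (pvPrefixLoop tags [0]) limit (fuel + 1) lo hi = lo := by
        simp only [pvBSearch, if_neg hlh]
      rw [this]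
      have : lo = hi := by omega
      subst this
      exact ⟨by omega, h1, h2⟩

-- ===== VERDICT =====
theorem trim_tags_to_limit_py_spec : Claim_equal_trim_tags_to_limit_py := by
  intro values limit _
  unfold Spec_trim_tags_to_limit_py trim_tags_to_limit_py trim_tags_to_limit_py_alt
  set tags := values.filter (fun t => ¬ (t = "")) with htags
  have hne : ∀ t ∈ tags, t ≠ "" := by
    intro t ht
    rw [htags] at ht
    simp only [List.mem_filter, decide_not] at ht
    simpa using ht.2
  rw [pvA_eq_gc]
  simp only [← htags, List.nil_append]
  -- both sides are `tags.take _`; show the two counts agree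
  congr 1
  set g := pvGC limit tags 0 with hg
  obtain ⟨gc1, gc2⟩ := pvGC_spec limit tags hne 0
  have hg_le := pvGC_le limit tags 0
  obtain ⟨hr_le, bs1, bs2⟩ := pvBS_spec tags limit hne tags.length 0 tags.length (by omega)
    (Nat.zero_le _) le_rfl (by intro k h1 h2; omega) (by intro k h1 h2; omega)
  set r := pvBSearch (pvPrefixLoop tags [0]) limit tags.length 0 tags.length with hrdef
  rcases Nat.lt_trichotomy g r with hlt | heq | hgt
  · exfalso
    have hPk := bs1 (g + 1) (by omega) (by omega)
    have := gc2 (g + 1) (by omega) (by omega)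
    simp only [zero_add] at this
    exact this hPk
  · exact heq
  · exfalso
    have hPk := gc1 (r + 1) (by omega) (by omega)
    simp only [zero_add] at hPk
    exact bs2 (r + 1) (by omega) (by omega) hPk
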